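-- pv_equiv track=rewrite | github.com/tylertownsend/llvm-project | cnxt/tools/cnxt_lint.py | _mask_comments_and_strings
-- ===== SOURCE A (Python) =====
-- def _mask_comments_and_strings(text: str) -> str:
--     chars = list(text)
--     in_line_comment = False
--     in_block_comment = False
--     in_string: str | None = None
--     escaped = False
--     idx = 0
--
--     while idx < len(chars):
--         char = chars[idx]
--         nxt = chars[idx + 1] if idx + 1 < len(chars) else ""
--
--         if in_line_comment:
--             if char == "\n":
--                 in_line_comment = False
--             else:
--                 chars[idx] = " "
--             idx += 1
--             continue
--
--         if in_block_comment:
--             if char == "*" and nxt == "/":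
--                 chars[idx] = " "
--                 chars[idx + 1] = " "
--                 in_block_comment = False
--                 idx += 2
--             else:
--                 if char != "\n":
--                     chars[idx] = " "
--                 idx += 1
--             continue
--
--         if in_string is not None:
--             if char != "\n":
--                 chars[idx] = " "
--             if escaped:
--                 escaped = False
--             elif char == "\\":
--                 escaped = True
--             elif char == in_string:
--                 in_string = None
--             idx += 1
--             continue
--
--         if char == "/" and nxt == "/":
--             chars[idx] = " "
--             chars[idx + 1] = " "
--             in_line_comment = True
--             idx += 2
--             continue
--
--         if char == "/" and nxt == "*":
--             chars[idx] = " "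
--             chars[idx + 1] = " "
--             in_block_comment = True
--             idx += 2
--             continue
--
--         if char in {'"', "'"}:
--             chars[idx] = " "
--             in_string = char
--             escaped = False
--             idx += 1
--             continue
--
--         idx += 1
--
--     return "".join(chars)
-- ===== SOURCE B (Python) =====
-- def _mask_comments_and_strings(text: str) -> str:
--     n = len(text)
--     out = []
--     i = 0
--     while i < n:
--         c = text[i]
--         if c == "/" and i + 1 < n and text[i + 1] == "/":
--             out.append("  ")
--             i += 2
--             while i < n and text[i] != "\n":
--                 out.append(" ")
--                 i += 1
--         elif c == "/" and i + 1 < n and text[i + 1] == "*":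
--             out.append("  ")
--             i += 2
--             while i < n:
--                 if text[i] == "*" and i + 1 < n and text[i + 1] == "/":
--                     out.append("  ")
--                     i += 2
--                     break
--                 out.append(text[i] if text[i] == "\n" else " ")
--                 i += 1
--         elif c in ('"', "'"):
--             out.append(" ")
--             i += 1
--             escaped = False
--             while i < n:
--                 ch = text[i]
--                 out.append(ch if ch == "\n" else " ")
--                 i += 1
--                 if escaped:
--                     escaped = False
--                 elif ch == "\\":
--                     escaped = True
--                 elif ch == c:
--                     break
--         else:
--             out.append(c)
--             i += 1
--     return "".join(out)
-- ===== Notes on version B (the rewrite author's own statement) =====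
-- stated objective: alternative
-- what changed: A runs one flat while-loop whose mode lives in four persistent state flags (in_line_comment/in_block_comment/in_string/escaped) re-checked on every character of a mutable char list; B scans with an outer loop that, on seeing a comment or string opener, runs a dedicated inner loop for that span and builds the output list directly, so the mode is encoded by control flow rather than flags.
import Mathlib
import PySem

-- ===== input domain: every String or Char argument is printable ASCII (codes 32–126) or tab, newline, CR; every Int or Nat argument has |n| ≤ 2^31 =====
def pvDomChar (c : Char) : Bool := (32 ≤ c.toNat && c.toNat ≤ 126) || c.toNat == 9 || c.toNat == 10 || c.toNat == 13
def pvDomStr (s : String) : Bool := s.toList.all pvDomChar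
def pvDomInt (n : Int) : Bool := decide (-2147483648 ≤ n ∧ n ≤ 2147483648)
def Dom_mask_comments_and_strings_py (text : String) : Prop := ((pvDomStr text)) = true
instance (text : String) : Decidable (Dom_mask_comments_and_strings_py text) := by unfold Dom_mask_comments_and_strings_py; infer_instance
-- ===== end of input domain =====

-- B replaces A's single while-loop with four persistent state flags by an outer scan with
-- dedicated inner loops for line comments, block comments and strings (objective: alternative).

-- ===== PORT A =====
-- A's while-loop over an index into the mutable char list, carrying the four state flags;
-- idx advances by 1 or 2 exactly as in the Python, writes are List.set at idx / idx+1.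
def maskLoopA (chars : List Char) (lineC blockC : Bool) (instr : Option Char)
    (escaped : Bool) (idx : Nat) : List Char :=
  if h : idx < chars.length then
    let char := chars[idx]
    let nxt : Option Char := chars[idx+1]?   -- Python's "" sentinel becomes none
    if lineC then
      if char = '\n' then maskLoopA chars false blockC instr escaped (idx+1)
      else maskLoopA (chars.set idx ' ') lineC blockC instr escaped (idx+1)
    else if blockC then
      if char = '*' ∧ nxt = some '/' then
        maskLoopA ((chars.set idx ' ').set (idx+1) ' ') lineC false instr escaped (idx+2)
      else
        maskLoopA (if char = '\n' then chars else chars.set idx ' ') lineC blockC instr escaped (idx+1)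
    else
      match instr with
      | some q =>
        let chars' := if char = '\n' then chars else chars.set idx ' '
        if escaped then maskLoopA chars' lineC blockC (some q) false (idx+1)
        else if char = '\\' then maskLoopA chars' lineC blockC (some q) true (idx+1)
        else if char = q then maskLoopA chars' lineC blockC none escaped (idx+1)
        else maskLoopA chars' lineC blockC (some q) escaped (idx+1)
      | none =>
        if char = '/' ∧ nxt = some '/' then
          maskLoopA ((chars.set idx ' ').set (idx+1) ' ') true blockC none escaped (idx+2)
        else if char = '/' ∧ nxt = some '*' then
          maskLoopA ((chars.set idx ' ').set (idx+1) ' ') lineC true none escaped (idx+2)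
        else if char = '"' ∨ char = '\'' then
          maskLoopA (chars.set idx ' ') lineC blockC (some char) false (idx+1)
        else maskLoopA chars lineC blockC none escaped (idx+1)
  else chars
termination_by chars.length - idx
decreasing_by all_goals first
  | omega
  | (simp [List.length_set]; omega)
  | (split <;> (try simp [List.length_set]) <;> omega)

def mask_comments_and_strings_py (text : String) : String :=
  String.ofList (maskLoopA text.toList false false none false 0)

-- ===== PORT B =====
-- B's inner loops become one recursive function each; lookahead text[i+1] is head? of the rest.
mutual
def maskLineB : List Char → List Char
  | [] => []
  | c :: rest => if c = '\n' then c :: maskNormB rest else ' ' :: maskLineB rest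
termination_by l => l.length
decreasing_by all_goals simp

def maskBlockB : List Char → List Char
  | [] => []
  | c :: rest =>
    if c = '*' ∧ rest.head? = some '/' then ' ' :: ' ' :: maskNormB rest.tail
    else (if c = '\n' then c else ' ') :: maskBlockB rest
termination_by l => l.length
decreasing_by all_goals simp

def maskStrB (q : Char) (escaped : Bool) : List Char → List Char
  | [] => []
  | c :: rest =>
    (if c = '\n' then c else ' ') ::
      (if escaped then maskStrB q false rest
       else if c = '\\' then maskStrB q true rest
       else if c = q then maskNormB rest
       else maskStrB q false rest)
termination_by l => l.length
decreasing_by all_goals simp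

def maskNormB : List Char → List Char
  | [] => []
  | c :: rest =>
    if c = '/' ∧ rest.head? = some '/' then ' ' :: ' ' :: maskLineB rest.tail
    else if c = '/' ∧ rest.head? = some '*' then ' ' :: ' ' :: maskBlockB rest.tail
    else if c = '"' ∨ c = '\'' then ' ' :: maskStrB c false rest
    else c :: maskNormB rest
termination_by l => l.length
decreasing_by all_goals simp
end

def mask_comments_and_strings_py_alt (text : String) : String :=
  String.ofList (maskNormB text.toList)

-- ===== PRECONDITION & SPEC =====
def Spec_mask_comments_and_strings_py (text : String) (out : String) : Prop := out = mask_comments_and_strings_py_alt text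
instance (text : String) (out : String) : Decidable (Spec_mask_comments_and_strings_py text out) := by unfold Spec_mask_comments_and_strings_py; infer_instance

-- ===== CLAIM (what is proved, stated in full; the proofs are below) =====
def Claim_equal_mask_comments_and_strings_py : Prop := ∀ (text : String), Dom_mask_comments_and_strings_py text → Spec_mask_comments_and_strings_py text (mask_comments_and_strings_py text)

-- ===== LEMMAS AND PROOFS =====

-- dispatch: which of B's loops corresponds to A's flag state
def maskDispatchB (lineC blockC : Bool) (instr : Option Char) (escaped : Bool) : List Char → List Char :=
  if lineC then maskLineB
  else if blockC then maskBlockB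
  else match instr with
  | some q => maskStrB q escaped
  | none => maskNormB

-- masking position i keeps the first i entries and appends a blank
theorem take_set_succ : ∀ (l : List Char) (i : Nat) (a : Char), i < l.length →
    (l.set i a).take (i+1) = l.take i ++ [a]
  | [], i, a, h => by simp at h
  | c :: t, 0, a, h => by simp
  | c :: t, i+1, a, h => by
    simp only [List.set_cons_succ, List.take_succ_cons, List.cons_append]
    rw [take_set_succ t i a (by simpa using h)]

-- writing before position j does not change the suffix from j
theorem drop_set_of_lt : ∀ (l : List Char) (i j : Nat) (a : Char), i < j →
    (l.set i a).drop j = l.drop j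
  | [], _, _, _, _ => by simp
  | c :: t, i, 0, a, h => by omega
  | c :: t, 0, j+1, a, h => by simp
  | c :: t, i+1, j+1, a, h => by
    simp only [List.set_cons_succ, List.drop_succ_cons]
    exact drop_set_of_lt t i j a (by omega)

-- one step of A that masks chars[i], against one step of B's current loop
theorem step_mask (l : List Char) (i : Nat) (h : i < l.length) (F G : List Char → List Char)
    (hFG : G (l.drop i) = ' ' :: F (l.drop (i+1))) :
    (l.set i ' ').take (i+1) ++ F ((l.set i ' ').drop (i+1)) = l.take i ++ G (l.drop i) := by
  rw [take_set_succ l i ' ' h, drop_set_of_lt l i (i+1) ' ' (by omega), hFG, List.append_assoc,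
    List.singleton_append]

-- one step of A that keeps chars[i]
theorem step_keep (l : List Char) (i : Nat) (h : i < l.length) (F G : List Char → List Char)
    (hFG : G (l.drop i) = l[i] :: F (l.drop (i+1))) :
    l.take (i+1) ++ F (l.drop (i+1)) = l.take i ++ G (l.drop i) := by
  rw [List.take_add_one, List.getElem?_eq_getElem h, hFG, Option.toList_some, List.append_assoc,
    List.singleton_append]

-- one step of A that masks chars[i] and chars[i+1]
theorem step_mask2 (l : List Char) (i : Nat) (h : i + 1 < l.length) (F G : List Char → List Char)
    (hFG : G (l.drop i) = ' ' :: ' ' :: F (l.drop (i+2))) :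
    ((l.set i ' ').set (i+1) ' ').take (i+2) ++ F (((l.set i ' ').set (i+1) ' ').drop (i+2))
      = l.take i ++ G (l.drop i) := by
  rw [take_set_succ _ (i+1) ' ' (by simpa using h),
    take_set_succ l i ' ' (by omega),
    drop_set_of_lt _ (i+1) (i+2) ' ' (by omega),
    drop_set_of_lt l i (i+2) ' ' (by omega), hFG]
  simp

-- the four flag states A can reach, each mapped to B's loop (all definitional)
theorem dispatch_line (escaped : Bool) : maskDispatchB true false none escaped = maskLineB := rfl
theorem dispatch_block (escaped : Bool) : maskDispatchB false true none escaped = maskBlockB := rfl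
theorem dispatch_str (q : Char) (escaped : Bool) :
    maskDispatchB false false (some q) escaped = maskStrB q escaped := rfl
theorem dispatch_norm (escaped : Bool) : maskDispatchB false false none escaped = maskNormB := rfl

-- A's loop, started at idx in any reachable flag state, finishes the suffix exactly as the
-- corresponding loop of B does.
theorem maskLoopA_eq_dispatch (chars : List Char) (lineC blockC : Bool) (instr : Option Char)
    (escaped : Bool) (idx : Nat) :
    (lineC = true → blockC = false ∧ instr = none) →
    (blockC = true → instr = none) →
    maskLoopA chars lineC blockC instr escaped idx
      = chars.take idx ++ maskDispatchB lineC blockC instr escaped (chars.drop idx) := by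
  fun_induction maskLoopA chars lineC blockC instr escaped idx with
  | case1 =>   -- line comment, newline: comment ends, char kept
    rename_i chars blockC instr escaped idx hlt char hc ih
    intro h1 h2
    obtain ⟨hb, hi⟩ := h1 rfl; subst hb; subst hi
    have hcc : chars[idx] = '\n' := hc
    rw [ih (by simp) (by simp)]
    apply step_keep chars idx hlt
    rw [← List.getElem_cons_drop hlt] <;> simp only [dispatch_line, dispatch_block, dispatch_str, dispatch_norm]
    simp only [maskLineB]
    rw [if_pos hcc, hcc]
  | case2 =>   -- line comment, other char: masked
    rename_i chars blockC instr escaped idx hlt char hc ih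
    intro h1 h2
    obtain ⟨hb, hi⟩ := h1 rfl; subst hb; subst hi
    have hcc : ¬ chars[idx] = '\n' := hc
    rw [ih (by simp) (by simp)]
    apply step_mask chars idx hlt
    rw [← List.getElem_cons_drop hlt] <;> simp only [dispatch_line, dispatch_block, dispatch_str, dispatch_norm]
    simp only [maskLineB]
    rw [if_neg hcc]
  | case3 =>   -- block comment, "*/": both masked, comment ends
    rename_i chars lineC instr escaped idx hlt char nxt hl hstar ih
    intro h1 h2
    have hi := h2 rfl; subst hi
    simp only [Bool.not_eq_true] at hl; subst hl
    obtain ⟨hc, hn⟩ := hstar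
    have hcc : chars[idx] = '*' := hc
    have hn' : chars[idx+1]? = some '/' := hn
    rw [List.getElem?_eq_some_iff] at hn'
    obtain ⟨hlt2, hget⟩ := hn'
    rw [ih (by simp) (by simp)]
    apply step_mask2 chars idx hlt2
    rw [← List.getElem_cons_drop hlt, ← List.getElem_cons_drop hlt2] <;> simp only [dispatch_line, dispatch_block, dispatch_str, dispatch_norm]
    simp only [maskBlockB]
    rw [if_pos (by simp [hcc, hget])]
    simp
  | case4 =>   -- block comment, other char: masked unless newline
    rename_i chars lineC instr escaped idx hlt char nxt hl hstar ih
    intro h1 h2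
    have hi := h2 rfl; subst hi
    simp only [Bool.not_eq_true] at hl; subst hl
    have hcond : ¬(chars[idx] = '*' ∧ ((chars.drop (idx+1)).head? = some '/')) := by
      rw [List.head?_drop]; exact fun h => hstar ⟨h.1, h.2⟩
    by_cases hn : char = '\n'
    · rw [if_pos hn]
      rw [dif_pos hn] at ih
      have hnn : chars[idx] = '\n' := hn
      rw [ih (by simp) (by simp)]
      apply step_keep chars idx hlt
      rw [← List.getElem_cons_drop hlt] <;> simp only [dispatch_line, dispatch_block, dispatch_str, dispatch_norm]
      simp only [maskBlockB]
      rw [if_neg (by rw [List.head?_drop]; exact fun h => hstar ⟨h.1, h.2⟩), if_pos hnn, hnn]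
    · rw [if_neg hn]
      rw [dif_neg hn] at ih
      have hnn : ¬ chars[idx] = '\n' := hn
      rw [ih (by simp) (by simp)]
      apply step_mask chars idx hlt
      rw [← List.getElem_cons_drop hlt] <;> simp only [dispatch_line, dispatch_block, dispatch_str, dispatch_norm]
      simp only [maskBlockB]
      rw [if_neg (by rw [List.head?_drop]; exact fun h => hstar ⟨h.1, h.2⟩), if_neg hnn]
  | case5 =>   -- in string, escaped: char masked (unless newline), escape consumed
    rename_i chars lineC blockC idx hlt char hl hb q chars' ih
    intro h1 h2
    simp only [Bool.not_eq_true] at hl hb; subst hl; subst hb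
    have hch' : chars' = if _h : char = '\n' then chars else chars.set idx ' ' := rfl
    rw [hch'] at ih ⊢
    by_cases hn : char = '\n'
    · rw [dif_pos hn] at ih ⊢
      have hnn : chars[idx] = '\n' := hn
      rw [ih (by simp) (by simp)]
      apply step_keep chars idx hlt
      rw [← List.getElem_cons_drop hlt] <;> simp only [dispatch_line, dispatch_block, dispatch_str, dispatch_norm]
      simp only [maskStrB]
      simp [hnn]
    · rw [dif_neg hn] at ih ⊢
      have hnn : ¬ chars[idx] = '\n' := hn
      rw [ih (by simp) (by simp)]
      apply step_mask chars idx hlt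
      rw [← List.getElem_cons_drop hlt] <;> simp only [dispatch_line, dispatch_block, dispatch_str, dispatch_norm]
      simp only [maskStrB]
      simp [hnn]
  | case6 =>   -- in string, backslash: masked, escape set
    rename_i chars lineC blockC escaped idx hlt char hl hb q chars' hesc hc ih
    intro h1 h2
    simp only [Bool.not_eq_true] at hl hb hesc; subst hl; subst hb; subst hesc
    have hch' : chars' = if _h : char = '\n' then chars else chars.set idx ' ' := rfl
    have hn : ¬ char = '\n' := by rw [show char = chars[idx] from rfl] at hc ⊢; rw [hc]; decide
    rw [hch', dif_neg hn] at ih ⊢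
    have hnn : ¬ chars[idx] = '\n' := hn
    have hcc : chars[idx] = '\\' := hc
    rw [ih (by simp) (by simp)]
    apply step_mask chars idx hlt
    rw [← List.getElem_cons_drop hlt] <;> simp only [dispatch_line, dispatch_block, dispatch_str, dispatch_norm]
    simp only [maskStrB]
    simp [hnn, hcc]
  | case7 =>   -- in string, closing quote: masked (unless newline), string ends
    rename_i chars lineC blockC escaped idx hlt char hl hb chars' hesc hc ih
    intro h1 h2
    simp only [Bool.not_eq_true] at hl hb hesc; subst hl; subst hb; subst hesc
    have hch' : chars' = if _h : char = '\n' then chars else chars.set idx ' ' := rfl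
    have hqc : char = chars[idx] := rfl
    have hcc : ¬ chars[idx] = '\\' := hc
    rw [hch'] at ih ⊢
    by_cases hn : char = '\n'
    · rw [dif_pos hn] at ih ⊢
      have hnn : chars[idx] = '\n' := hn
      rw [ih (by simp) (by simp)]
      apply step_keep chars idx hlt
      rw [← List.getElem_cons_drop hlt] <;> simp only [dispatch_line, dispatch_block, dispatch_str, dispatch_norm]
      simp only [maskStrB]
      simp [hnn, hcc, hqc, hn]
    · rw [dif_neg hn] at ih ⊢
      have hnn : ¬ chars[idx] = '\n' := hn
      rw [ih (by simp) (by simp)]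
      apply step_mask chars idx hlt
      rw [← List.getElem_cons_drop hlt] <;> simp only [dispatch_line, dispatch_block, dispatch_str, dispatch_norm]
      simp only [maskStrB]
      simp [hnn, hcc, hqc, hn]
  | case8 =>   -- in string, ordinary char: masked (unless newline)
    rename_i chars lineC blockC escaped idx hlt char hl hb q chars' hesc hc hq ih
    intro h1 h2
    simp only [Bool.not_eq_true] at hl hb hesc; subst hl; subst hb; subst hesc
    have hch' : chars' = if _h : char = '\n' then chars else chars.set idx ' ' := rfl
    have hqc : char = chars[idx] := rfl
    have hcc : ¬ chars[idx] = '\\' := hc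
    have hqq : ¬ chars[idx] = q := hq
    rw [hch'] at ih ⊢
    by_cases hn : char = '\n'
    · rw [dif_pos hn] at ih ⊢
      have hnn : chars[idx] = '\n' := hn
      rw [ih (by simp) (by simp)]
      apply step_keep chars idx hlt
      rw [← List.getElem_cons_drop hlt] <;> simp only [dispatch_line, dispatch_block, dispatch_str, dispatch_norm]
      simp only [maskStrB]
      simp [hnn, hcc, hqq, hqc, hn]
      exact fun hx => absurd (hnn.trans hx) hqq
    · rw [dif_neg hn] at ih ⊢
      have hnn : ¬ chars[idx] = '\n' := hn
      rw [ih (by simp) (by simp)]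
      apply step_mask chars idx hlt
      rw [← List.getElem_cons_drop hlt] <;> simp only [dispatch_line, dispatch_block, dispatch_str, dispatch_norm]
      simp only [maskStrB]
      simp [hnn, hcc, hqq, hqc, hn]
  | case9 =>   -- normal, "//": both masked, line comment starts
    rename_i chars lineC blockC escaped idx hlt char nxt hl hb hslash ih
    intro h1 h2
    simp only [Bool.not_eq_true] at hl hb; subst hl; subst hb
    obtain ⟨hc, hn⟩ := hslash
    have hcc : chars[idx] = '/' := hc
    have hn' : chars[idx+1]? = some '/' := hn
    rw [List.getElem?_eq_some_iff] at hn'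
    obtain ⟨hlt2, hget⟩ := hn'
    rw [ih (by simp) (by simp)]
    apply step_mask2 chars idx hlt2
    rw [← List.getElem_cons_drop hlt, ← List.getElem_cons_drop hlt2] <;> simp only [dispatch_line, dispatch_block, dispatch_str, dispatch_norm]
    simp only [maskNormB]
    rw [if_pos (by simp [hcc, hget])]
    simp
  | case10 =>   -- normal, "/*": both masked, block comment starts
    rename_i chars lineC blockC escaped idx hlt char nxt hl hb hns hstar ih
    intro h1 h2
    simp only [Bool.not_eq_true] at hl hb; subst hl; subst hb
    obtain ⟨hc, hn⟩ := hstar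
    have hcc : chars[idx] = '/' := hc
    have hn' : chars[idx+1]? = some '*' := hn
    rw [List.getElem?_eq_some_iff] at hn'
    obtain ⟨hlt2, hget⟩ := hn'
    have hne : ¬ chars[idx+1] = '/' := by rw [hget]; decide
    rw [ih (by simp) (by simp)]
    apply step_mask2 chars idx hlt2
    rw [← List.getElem_cons_drop hlt, ← List.getElem_cons_drop hlt2] <;> simp only [dispatch_line, dispatch_block, dispatch_str, dispatch_norm]
    simp only [maskNormB]
    rw [if_neg (by simp [List.getElem?_eq_getElem hlt2, hget]), if_pos (by simp [hcc, hget])]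
    simp
  | case11 =>   -- normal, quote: masked, string starts
    rename_i chars lineC blockC escaped idx hlt char nxt hl hb hns hnb hq ih
    intro h1 h2
    simp only [Bool.not_eq_true] at hl hb; subst hl; subst hb
    have hqq : chars[idx] = '"' ∨ chars[idx] = '\'' := hq
    have hn1 : ¬(chars[idx] = '/' ∧ ((chars.drop (idx+1)).head? = some '/')) := by
      rw [List.head?_drop]; exact fun h => hns ⟨h.1, h.2⟩
    have hn2 : ¬(chars[idx] = '/' ∧ ((chars.drop (idx+1)).head? = some '*')) := by
      rw [List.head?_drop]; exact fun h => hnb ⟨h.1, h.2⟩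
    rw [ih (by simp) (by simp)]
    apply step_mask chars idx hlt
    rw [← List.getElem_cons_drop hlt] <;> simp only [dispatch_line, dispatch_block, dispatch_str, dispatch_norm]
    simp only [maskNormB]
    rw [if_neg hn1, if_neg hn2, if_pos hqq]
  | case12 =>   -- normal, ordinary char: kept
    rename_i chars lineC blockC escaped idx hlt char nxt hl hb hns hnb hq ih
    intro h1 h2
    simp only [Bool.not_eq_true] at hl hb; subst hl; subst hb
    have hqq : ¬ (chars[idx] = '"' ∨ chars[idx] = '\'') := hq
    have hn1 : ¬(chars[idx] = '/' ∧ ((chars.drop (idx+1)).head? = some '/')) := by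
      rw [List.head?_drop]; exact fun h => hns ⟨h.1, h.2⟩
    have hn2 : ¬(chars[idx] = '/' ∧ ((chars.drop (idx+1)).head? = some '*')) := by
      rw [List.head?_drop]; exact fun h => hnb ⟨h.1, h.2⟩
    rw [ih (by simp) (by simp)]
    apply step_keep chars idx hlt
    rw [← List.getElem_cons_drop hlt] <;> simp only [dispatch_line, dispatch_block, dispatch_str, dispatch_norm]
    simp only [maskNormB]
    rw [if_neg hn1, if_neg hn2, if_neg hqq]
  | case13 =>   -- past the end: loop returns the list unchanged
    rename_i chars lineC blockC instr escaped idx hlt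
    intro h1 h2
    have hle : chars.length ≤ idx := by omega
    rw [List.take_of_length_le hle, List.drop_eq_nil_of_le hle]
    cases lineC <;> cases blockC <;> cases instr <;>
      simp [maskDispatchB, maskLineB, maskBlockB, maskStrB, maskNormB]

-- ===== VERDICT (by name: the statement is the Claim_ definition above) =====
theorem mask_comments_and_strings_py_spec : Claim_equal_mask_comments_and_strings_py := by
  intro text _
  unfold Spec_mask_comments_and_strings_py mask_comments_and_strings_py mask_comments_and_strings_py_alt
  rw [maskLoopA_eq_dispatch _ _ _ _ _ _ (by simp) (by simp)]
  simp [maskDispatchB]
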